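-- pv_equiv track=rewrite | github.com/Ankit-Ahirrao/Real_Interview_Problems | Algorithms/ReadingVertically/ReadingVertically.py | readingVertically
-- ===== SOURCE A (Python) =====
-- from collections import deque
--
-- def readingVertically(arr):
--     clean = [word.strip() for word in arr]
--     strings = deque([word for word in clean if len(word)])
--     buffer = []
--     while strings:
--         cur = strings.popleft()
--         first_char, remaining = cur[0], cur[1:]
--         buffer.append(first_char)
--         if len(remaining):
--             strings.append(remaining)
--     return ''.join(buffer)
-- ===== SOURCE B (Python) =====
-- def readingVertically(arr):
--     cols = []
--     for word in arr:
--         for i, ch in enumerate(word.strip()):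
--             if i == len(cols):
--                 cols.append([])
--             cols[i].append(ch)
--     return ''.join(''.join(col) for col in cols)
-- ===== Notes on version B (the rewrite author's own statement) =====
-- stated objective: faster
-- what changed: replaces the deque round-robin with repeated slicing (cur[1:]) by a single pass that distributes each character into per-column buckets by its index, then joins the buckets
import Mathlib
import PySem

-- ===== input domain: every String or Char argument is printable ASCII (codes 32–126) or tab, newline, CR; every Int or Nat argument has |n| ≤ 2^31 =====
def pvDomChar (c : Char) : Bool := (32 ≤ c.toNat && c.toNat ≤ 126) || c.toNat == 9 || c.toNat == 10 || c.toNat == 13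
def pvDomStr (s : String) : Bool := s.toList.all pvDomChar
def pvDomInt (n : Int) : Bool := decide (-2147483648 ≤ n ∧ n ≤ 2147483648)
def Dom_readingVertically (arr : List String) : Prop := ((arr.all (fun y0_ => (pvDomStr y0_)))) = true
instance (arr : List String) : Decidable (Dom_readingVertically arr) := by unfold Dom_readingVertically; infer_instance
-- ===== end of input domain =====

-- B replaces A's deque round-robin (which re-slices every remaining word each step) by one
-- pass bucketing each character into its column, then joining the buckets: same output, faster.

-- ===== PORT A =====
-- A's while-loop over the deque: pop the front word, emit its first char, re-append its
-- nonempty remainder.  Queue elements are nonempty by construction ([] case is unreachable).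
def loopA : List (List Char) → List Char
  | [] => []
  | [] :: q => loopA q
  | (c :: rest) :: q => c :: loopA (q ++ if rest = [] then [] else [rest])
termination_by q => (q.map List.length).sum + q.length
decreasing_by
  · simp
  · by_cases h : rest = [] <;> simp [h] <;> omega

def readingVertically (arr : List String) : String :=
  let clean := arr.map (fun word => (PySem.Str.strip word).toList)
  let strings := clean.filter (· ≠ [])
  String.mk (loopA strings)

-- ===== PORT B =====
-- one character insertion: `if i == len(cols): cols.append([])` then `cols[i].append(ch)`;
-- i comes from enumerate so 0 ≤ i, and i ≤ len(cols) always, so .toNat is exact here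
def insertChar (cols : List (List Char)) (i : Int) (ch : Char) : List (List Char) :=
  let cols := if i = (cols.length : Int) then cols ++ [[]] else cols
  cols.modify i.toNat (· ++ [ch])

def readingVertically_alt (arr : List String) : String :=
  let cols := arr.foldl (fun cols word =>
      (PySem.List.enumerate (PySem.Str.strip word).toList).foldl
        (fun cols p => insertChar cols p.1 p.2) cols) []
  String.mk (cols.foldl (fun acc col => acc ++ col) [])

-- ===== PRECONDITION & SPEC =====
def Spec_readingVertically (arr : List String) (out : String) : Prop := out = readingVertically_alt arr
instance (arr : List String) (out : String) : Decidable (Spec_readingVertically arr out) := by unfold Spec_readingVertically; infer_instance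

-- ===== CLAIM (what is proved, stated in full; the proofs are below) =====
def Claim_equal_readingVertically : Prop := ∀ (arr : List String), Dom_readingVertically arr → Spec_readingVertically arr (readingVertically arr)

-- ===== LEMMAS AND PROOFS =====

-- first characters of the nonempty words, and the tails of the nonempty words
def heads (ws : List (List Char)) : List Char := ws.filterMap List.head?
def tls (ws : List (List Char)) : List (List Char) := ws.filterMap List.tail?

-- reference reading: one column at a time
lemma sum_tls_le (ws : List (List Char)) :
    ((tls ws).map List.length).sum ≤ (ws.map List.length).sum := by
  induction ws with
  | nil => simp [tls]
  | cons w ws ih =>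
    cases w with
    | nil => simpa [tls] using le_trans ih (by omega)
    | cons c w => simp [tls] at ih ⊢; omega

lemma sum_tls_lt (ws : List (List Char)) (h : heads ws ≠ []) :
    ((tls ws).map List.length).sum < (ws.map List.length).sum := by
  induction ws with
  | nil => simp [heads] at h
  | cons w ws ih =>
    cases w with
    | nil => simpa [tls, heads] using ih (by simpa [heads] using h)
    | cons c w =>
      have h2 := sum_tls_le ws
      simp [tls] at h2 ⊢; omega

def colsRead (ws : List (List Char)) : List Char :=
  if h : heads ws = [] then [] else heads ws ++ colsRead (tls ws)
termination_by (ws.map List.length).sum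
decreasing_by exact sum_tls_lt ws h

lemma heads_filter (ws : List (List Char)) :
    heads (ws.filter (· ≠ [])) = heads ws := by
  induction ws with
  | nil => rfl
  | cons w ws ih => cases w <;> simp [heads] at ih ⊢ <;> exact ih

lemma tls_filter (ws : List (List Char)) :
    tls (ws.filter (· ≠ [])) = tls ws := by
  induction ws with
  | nil => rfl
  | cons w ws ih => cases w <;> simp [tls] at ih ⊢ <;> exact ih

lemma colsRead_filter (ws : List (List Char)) :
    colsRead (ws.filter (· ≠ [])) = colsRead ws := by
  rw [colsRead, heads_filter, tls_filter, ← colsRead]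

lemma heads_nil_all (ws : List (List Char)) (h : heads ws = []) : ∀ w ∈ ws, w = [] := by
  induction ws with
  | nil => simp
  | cons w ws ih =>
    cases w with
    | nil => simpa [heads] using fun x hx => ih (by simpa [heads] using h) x hx
    | cons c w => simp [heads] at h

-- A-side: one full round of the queue emits the heads and leaves the nonempty tails
lemma loopA_round (q : List (List Char)) : ∀ r,
    loopA (q ++ r) = heads q ++ loopA (r ++ (tls q).filter (· ≠ [])) := by
  induction q with
  | nil => intro r; simp [heads, tls]
  | cons w q ih =>
    intro r
    cases w with
    | nil => simpa [heads, tls, loopA] using ih r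
    | cons c w =>
      have : loopA ((c :: w) :: (q ++ r)) = c :: loopA (q ++ (r ++ if w = [] then [] else [w])) := by
        rw [loopA]; simp
      rw [List.cons_append, this, ih (r ++ if w = [] then [] else [w])]
      by_cases hw : w = [] <;> simp [heads, tls, hw]

lemma loopA_nil_of_heads_nil (q : List (List Char)) (h : heads q = []) : loopA q = [] := by
  induction q with
  | nil => rw [loopA]
  | cons w q ih =>
    cases w with
    | nil => exact (by rw [loopA]; exact ih (by simpa [heads] using h))
    | cons c w => simp [heads] at h

lemma sum_filter_le (ws : List (List Char)) :
    ((ws.filter (· ≠ [])).map List.length).sum ≤ (ws.map List.length).sum := by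
  induction ws with
  | nil => simp
  | cons w ws ih =>
    by_cases hw : w = [] <;> simp [hw] at ih ⊢ <;> omega

lemma loopA_eq_colsRead (q : List (List Char)) : loopA q = colsRead q := by
  suffices H : ∀ n (q : List (List Char)), (q.map List.length).sum < n → loopA q = colsRead q from
    H _ q (Nat.lt_succ_self _)
  intro n
  induction n with
  | zero => intro q h; omega
  | succ n ih =>
    intro q h
    by_cases hh : heads q = []
    · rw [loopA_nil_of_heads_nil q hh, colsRead]; simp [hh]
    · have h1 := loopA_round q []
      simp only [List.append_nil, List.nil_append] at h1
      have hle : (((tls q).filter (· ≠ [])).map List.length).sum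
          ≤ ((tls q).map List.length).sum := sum_filter_le (tls q)
      have hlt : (((tls q).filter (· ≠ [])).map List.length).sum < n :=
        lt_of_le_of_lt hle (by have := sum_tls_lt q hh; omega)
      rw [h1, ih _ hlt, colsRead_filter]
      conv_rhs => rw [colsRead]
      simp [hh]

-- B-side reference: append each char of w to the corresponding column
def zipAppend : List (List Char) → List Char → List (List Char)
  | cols, [] => cols
  | [], c :: w => [c] :: zipAppend [] w
  | b :: bs, c :: w => (b ++ [c]) :: zipAppend bs w

lemma modify_append_length {α : Type} (pre : List α) (x : α) (suf : List α) (f : α → α) :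
    (pre ++ x :: suf).modify pre.length f = pre ++ f x :: suf := by
  induction pre with
  | nil => simp
  | cons a pre ih => simpa using ih

-- the enumerate/bucket inner loop of the port is zipAppend on the part after `pre`
lemma enumFold_eq_zipAppend (w : List Char) : ∀ (pre suf : List (List Char)),
    (PySem.List.enumerate w (pre.length : Int)).foldl
        (fun cols p => insertChar cols p.1 p.2) (pre ++ suf)
      = pre ++ zipAppend suf w := by
  induction w with
  | nil => intro pre suf; simp [PySem.List.enumerate_nil, zipAppend]
  | cons c w ih =>
    intro pre suf
    rw [PySem.List.enumerate_cons]
    cases suf with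
    | nil =>
      have hstep : insertChar (pre ++ []) ((pre.length : Int)) c = (pre ++ [[c]]) ++ [] := by
        simp [insertChar]
        simpa using modify_append_length pre ([] : List Char) [] (fun x => x ++ [c])
      have hlen : ((pre ++ [[c]]).length : Int) = (pre.length : Int) + 1 := by simp
      simp only [List.foldl_cons, hstep]
      rw [← hlen, ih (pre ++ [[c]]) []]
      simp [zipAppend]
    | cons s suf =>
      have hstep : insertChar (pre ++ s :: suf) ((pre.length : Int)) c
          = (pre ++ [s ++ [c]]) ++ suf := by
        simp [insertChar]
        rw [if_neg (by omega), modify_append_length pre s suf (· ++ [c])]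
      have hlen : ((pre ++ [s ++ [c]]).length : Int) = (pre.length : Int) + 1 := by simp
      simp only [List.foldl_cons, hstep]
      rw [← hlen, ih (pre ++ [s ++ [c]]) suf]
      simp [zipAppend]

lemma word_fold_eq_zipAppend (w : List Char) (cols : List (List Char)) :
    (PySem.List.enumerate w).foldl (fun cols p => insertChar cols p.1 p.2) cols
      = zipAppend cols w := by
  simpa using enumFold_eq_zipAppend w [] cols

lemma foldl_zipAppend_cons (ws : List (List Char)) : ∀ b bs,
    ws.foldl zipAppend (b :: bs) = (b ++ heads ws) :: (tls ws).foldl zipAppend bs := by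
  induction ws with
  | nil => intro b bs; simp [heads, tls]
  | cons w ws ih =>
    intro b bs
    cases w with
    | nil => simpa [heads, tls, zipAppend] using ih b bs
    | cons c w => simp [heads, tls, zipAppend, ih]

lemma foldl_zipAppend_nil_of_heads_nil (ws : List (List Char)) (h : heads ws = []) :
    ∀ cols, ws.foldl zipAppend cols = cols := by
  induction ws with
  | nil => intro cols; rfl
  | cons w ws ih =>
    intro cols
    have hw : w = [] := heads_nil_all _ h w (by simp)
    subst hw
    simpa [zipAppend] using ih (by simpa [heads] using h) cols

lemma foldl_zipAppend_heads (ws : List (List Char)) (h : heads ws ≠ []) :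
    ws.foldl zipAppend [] = heads ws :: (tls ws).foldl zipAppend [] := by
  induction ws with
  | nil => simp [heads] at h
  | cons w ws ih =>
    cases w with
    | nil => simpa [heads, tls, zipAppend] using ih (by simpa [heads] using h)
    | cons c w => simp [heads, tls, zipAppend, foldl_zipAppend_cons]

lemma buckets_flatten_eq_colsRead (ws : List (List Char)) :
    (ws.foldl zipAppend []).flatten = colsRead ws := by
  suffices H : ∀ n (ws : List (List Char)), (ws.map List.length).sum < n →
      (ws.foldl zipAppend []).flatten = colsRead ws from H _ ws (Nat.lt_succ_self _)
  intro n
  induction n with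
  | zero => intro ws h; omega
  | succ n ih =>
    intro ws h
    by_cases hh : heads ws = []
    · rw [foldl_zipAppend_nil_of_heads_nil ws hh, colsRead]; simp [hh]
    · rw [foldl_zipAppend_heads ws hh, colsRead]
      have hlt : ((tls ws).map List.length).sum < n := by
        have := sum_tls_lt ws hh
        omega
      simp [hh, ih _ hlt]

lemma foldl_append_eq_flatten {α : Type} (l : List (List α)) : ∀ acc : List α,
    l.foldl (fun acc col => acc ++ col) acc = acc ++ l.flatten := by
  induction l with
  | nil => intro acc; simp
  | cons x l ih => intro acc; simp [ih]

lemma outer_fold_eq (g : String → List Char) (arr : List String) : ∀ cols,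
    arr.foldl (fun cols word =>
      (PySem.List.enumerate (g word)).foldl
        (fun cols p => insertChar cols p.1 p.2) cols) cols
      = (arr.map g).foldl zipAppend cols := by
  induction arr with
  | nil => intro cols; rfl
  | cons a arr ih => intro cols; rw [List.foldl_cons, word_fold_eq_zipAppend]; exact ih _

-- ===== VERDICT (by name: the statement is the Claim_ definition above) =====
theorem readingVertically_spec : Claim_equal_readingVertically := by
  intro arr _
  unfold Spec_readingVertically readingVertically readingVertically_alt
  simp only
  rw [outer_fold_eq (fun word => (PySem.Str.strip word).toList) arr,
     foldl_append_eq_flatten, buckets_flatten_eq_colsRead,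
     loopA_eq_colsRead, colsRead_filter]
  simp
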